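-- pv_equiv track=rewrite | github.com/yz4004/codeforce-python | copypaste/容斥原理.py | include_exclusion_prime_factor_template
-- ===== SOURCE A (Python) =====
-- def include_exclusion_prime_factor_template(n):
--     # 1...n 中所有被下面质因子整除的数 容斥排除
--     # 2,3,5,7
--     vals = (2,3,5,7)
--
--     # - (所有被至少一个素数整除的数) + (所有至少被两个素数整除的数) - ...
--
--     res = n
--     for s in range(1, 1<<4):
--         sign = -1 if s.bit_count() % 2 == 1 else 1
--         t = 1
--         for i,v in enumerate(vals):
--             if s >> i & 1:
--                 t *= v
--
--         res += sign * (n // t) # 所有被t整除的数的个数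
--     return res
-- ===== SOURCE B (Python) =====
-- def include_exclusion_prime_factor_template(n):
--     # Recursive inclusion-exclusion over the prime list instead of a 16-subset bitmask loop:
--     # helper(m, primes) = count after excluding multiples of each prime in `primes` from the base count m.
--     def helper(m, primes):
--         if not primes:
--             return m
--         return helper(m, primes[1:]) - helper(m // primes[0], primes[1:])
--     return helper(n, (2, 3, 5, 7))
-- ===== Notes on version B (the rewrite author's own statement) =====
-- stated objective: alternative
-- what changed: Replaces the bitmask loop over all nonempty prime subsets (sign from bit_count, divisor product from an inner enumerate scan) with a binary recursion over the prime list: the helper returns its argument when no primes remain, else the helper on the rest minus the helper on the floor quotient by the first prime; correctness rests on nested floor division by positive divisors composing to division by their product.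
import Mathlib
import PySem

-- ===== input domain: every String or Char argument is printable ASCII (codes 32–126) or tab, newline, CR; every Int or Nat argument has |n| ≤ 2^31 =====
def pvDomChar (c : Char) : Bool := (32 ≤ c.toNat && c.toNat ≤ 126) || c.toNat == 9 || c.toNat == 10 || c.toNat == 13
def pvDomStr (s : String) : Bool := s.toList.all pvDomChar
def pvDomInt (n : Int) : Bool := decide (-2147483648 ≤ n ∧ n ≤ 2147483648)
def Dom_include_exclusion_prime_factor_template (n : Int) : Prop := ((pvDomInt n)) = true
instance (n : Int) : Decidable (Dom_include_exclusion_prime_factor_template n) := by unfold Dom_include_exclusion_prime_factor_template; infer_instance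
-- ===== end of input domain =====

-- B replaces the bitmask loop over all nonempty prime subsets by a binary recursion over the prime list (alternative decomposition, same cost).

-- ===== PORT A =====
def include_exclusion_prime_factor_template (n : Int) : Int :=
  let vals : List Int := [2, 3, 5, 7]
  (PySem.List.pyRange 1 (1 <<< 4) 1).foldl (fun res s =>
    let sign : Int := if PySem.Int.bitCount s % 2 = 1 then -1 else 1
    let t : Int := (PySem.List.enumerate vals).foldl
      (fun t iv => if PySem.Int.band (s >>> iv.1.toNat) 1 = 1 then t * iv.2 else t) 1
    res + sign * PySem.Int.floordiv n t) n

-- ===== PORT B =====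
def ieHelper (m : Int) : List Int → Int
  | [] => m
  | p :: rest => ieHelper m rest - ieHelper (PySem.Int.floordiv m p) rest

def include_exclusion_prime_factor_template_alt (n : Int) : Int :=
  ieHelper n [2, 3, 5, 7]

-- ===== PRECONDITION & SPEC =====
def Spec_include_exclusion_prime_factor_template (n : Int) (out : Int) : Prop := out = include_exclusion_prime_factor_template_alt n
instance (n : Int) (out : Int) : Decidable (Spec_include_exclusion_prime_factor_template n out) := by unfold Spec_include_exclusion_prime_factor_template; infer_instance

-- ===== CLAIM (what is proved, stated in full; the proofs are below) =====
def Claim_equal_include_exclusion_prime_factor_template : Prop := ∀ (n : Int), Dom_include_exclusion_prime_factor_template n → Spec_include_exclusion_prime_factor_template n (include_exclusion_prime_factor_template n)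

-- ===== LEMMAS AND PROOFS =====

-- ===== VERDICT (by name: the statement is the Claim_ definition above) =====
theorem include_exclusion_prime_factor_template_spec : Claim_equal_include_exclusion_prime_factor_template := by
  intro n _
  unfold Spec_include_exclusion_prime_factor_template
  have hA : include_exclusion_prime_factor_template n = n + -1 * PySem.Int.floordiv n 2 + -1 * PySem.Int.floordiv n 3 + 1 * PySem.Int.floordiv n 6 + -1 * PySem.Int.floordiv n 5 + 1 * PySem.Int.floordiv n 10 + 1 * PySem.Int.floordiv n 15 + -1 * PySem.Int.floordiv n 30 + -1 * PySem.Int.floordiv n 7 + 1 * PySem.Int.floordiv n 14 + 1 * PySem.Int.floordiv n 21 + -1 * PySem.Int.floordiv n 42 + 1 * PySem.Int.floordiv n 35 + -1 * PySem.Int.floordiv n 70 + -1 * PySem.Int.floordiv n 105 + 1 * PySem.Int.floordiv n 210 := rfl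
  rw [hA]
  simp only [include_exclusion_prime_factor_template_alt, ieHelper]
  norm_num [PySem.Int.floordiv_eq_ediv_of_pos, Int.ediv_ediv_of_nonneg]
  omega
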